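-- pv_equiv track=rewrite | github.com/kyucchoi/python-algorithm | level0/이차원_배열_대각선_순회하기/solution.py | solution
-- ===== SOURCE A (Python) =====
-- def solution(board, k):
--     total = 0
--     # 행의 개수
--     rows = len(board)
--     # 열의 개수
--     cols = len(board[0])
--
--     # 모든 위치 (i,j)에 대해 검사
--     for i in range(rows):
--         for j in range(cols):
--             # i + j가 k 이하인 경우만 더함
--             if i + j <= k:
--                 total += board[i][j]
--
--     return total
-- ===== SOURCE B (Python) =====
-- def solution(board, k):
--     # Stage 1: build a prefix-sum table for every row.
--     tables = []
--     for row in board: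
--         pref = [0]
--         for x in row:
--             pref.append(pref[-1] + x)
--         tables.append(pref)
--     # Stage 2: the admissible cells of row i form the prefix of length
--     # clamp(k - i + 1, 0, cols), so one table lookup per row gives its sum.
--     cols = len(board[0])
--     total = 0
--     for i, pref in enumerate(tables):
--         total += pref[max(0, min(cols, k - i + 1))]
--     return total
-- ===== Notes on version B (the rewrite author's own statement) =====
-- stated objective: alternative
-- what changed: B replaces A's nested scan with a per-cell i+j<=k test by a two-stage algorithm: it first builds a prefix-sum table for every row, then answers with a single table lookup per row (the admissible cells of row i are exactly the prefix of length clamp(k-i+1,0,cols)); it trades A's inner conditional loop for an extra table of size rows*(cols+1).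
import Mathlib
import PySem

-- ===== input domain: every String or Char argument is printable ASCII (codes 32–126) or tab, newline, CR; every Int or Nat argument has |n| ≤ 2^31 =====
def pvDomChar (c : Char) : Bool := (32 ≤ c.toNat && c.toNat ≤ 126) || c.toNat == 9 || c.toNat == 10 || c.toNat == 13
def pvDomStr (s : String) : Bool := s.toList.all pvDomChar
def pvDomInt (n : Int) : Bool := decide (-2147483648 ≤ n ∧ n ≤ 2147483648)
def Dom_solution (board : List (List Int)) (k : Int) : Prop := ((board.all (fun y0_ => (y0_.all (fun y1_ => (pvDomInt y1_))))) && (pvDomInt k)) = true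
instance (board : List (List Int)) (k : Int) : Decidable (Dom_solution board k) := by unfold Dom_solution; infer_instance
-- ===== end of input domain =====

-- B is a two-stage algorithm: it builds a prefix-sum table per row, then answers with
-- one table lookup per row (the admissible cells of row i are a prefix), instead of
-- A's nested scan that tests i + j <= k at every cell.

-- ===== PORT A =====
def solution (board : List (List Int)) (k : Int) : Int :=
  let rows : Int := board.length
  let cols : Int := ((PySem.List.pyGet? board 0).getD []).length
  (PySem.List.pyRange 0 rows 1).foldl (fun total i =>
    (PySem.List.pyRange 0 cols 1).foldl (fun total j =>
      if i + j ≤ k then total + PySem.List.pyGetD (PySem.List.pyGetD board i []) j 0 else total)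
      total) 0

-- ===== PORT B =====
-- 'pref = [0]; for x in row: pref.append(pref[-1] + x)'
def buildPref (row : List Int) : List Int :=
  row.foldl (fun pref x => pref ++ [PySem.List.pyGetD pref (-1) 0 + x]) [0]

def solution_alt (board : List (List Int)) (k : Int) : Int :=
  -- stage 1: 'tables = []; for row in board: … tables.append(pref)'
  let tables := board.map buildPref
  let cols : Int := ((PySem.List.pyGet? board 0).getD []).length
  -- stage 2: 'for i, pref in enumerate(tables): total += pref[max(0, min(cols, k-i+1))]'
  (PySem.List.enumerate tables 0).foldl
    (fun total p => total + PySem.List.pyGetD p.2 (max 0 (min cols (k - p.1 + 1))) 0) 0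

-- ===== PRECONDITION & SPEC =====
-- Pre_ is exactly where A returns: A raises IndexError on an empty board (board[0])
-- and on ragged boards where some visited cell board[i][j] (j < len(board[0]), i+j ≤ k)
-- falls beyond the end of its row.
def Pre_solution (board : List (List Int)) (k : Int) : Prop :=
  board ≠ [] ∧ ∀ i ∈ List.range board.length,
    min ((board.headD []).length : Int) (k - (i : Int) + 1) ≤ ((board.getD i []).length : Int)
instance (board : List (List Int)) (k : Int) : Decidable (Pre_solution board k) := by
  unfold Pre_solution; infer_instance
def pvWitness_solution : List (List Int) × Int := ([[1, 2], [3, 4]], 1)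

def Spec_solution (board : List (List Int)) (k : Int) (out : Int) : Prop := out = solution_alt board k
instance (board : List (List Int)) (k : Int) (out : Int) : Decidable (Spec_solution board k out) := by
  unfold Spec_solution; infer_instance

-- ===== CLAIM (what is proved, stated in full; the proofs are below) =====
def Claim_equal_solution : Prop := ∀ (board : List (List Int)) (k : Int),
  Dom_solution board k → Pre_solution board k → Spec_solution board k (solution board k)

-- ===== LEMMAS AND PROOFS =====

-- structural reference value: sum over rows, row i contributing its admissible prefix
def refSum (k cols : Int) : List (List Int) → Int → Int
  | [], _ => 0
  | row :: rest, i => (row.take (min cols (k - i + 1)).toNat).sum + refSum k cols rest (i + 1)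

-- ---- A-side: solution = refSum ----

-- inner loop of A = sum of the admissible prefix of the row
theorem inner_eq (row : List Int) (i k : Int) (cols : Nat) (t : Int)
    (hlen : (min (cols : Int) (k - i + 1)).toNat ≤ row.length) :
    (PySem.List.pyRange 0 (cols : Int) 1).foldl
      (fun total j => if i + j ≤ k then total + PySem.List.pyGetD row j 0 else total) t
    = t + (row.take (min (cols : Int) (k - i + 1)).toNat).sum := by
  induction cols generalizing t with
  | zero =>
    have h0 : (min (((0 : Nat) : Int)) (k - i + 1)).toNat = 0 := by
      rw [Int.toNat_eq_zero]; push_cast; omega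
    rw [h0, show ((0 : Nat) : Int) = 0 from rfl, PySem.List.pyRange_one_eq_nil le_rfl]
    simp
  | succ n ih =>
    have hsplit : PySem.List.pyRange 0 ((n + 1 : Nat) : Int) 1
        = PySem.List.pyRange 0 (n : Int) 1 ++ [(n : Int)] := by
      push_cast
      exact PySem.List.pyRange_one_succ_right (by positivity)
    have hmono : (min ((n : Nat) : Int) (k - i + 1)).toNat ≤ row.length := by
      refine le_trans ?_ hlen
      apply Int.toNat_le_toNat
      push_cast; omega
    rw [hsplit, List.foldl_append, ih _ hmono]
    simp only [List.foldl_cons, List.foldl_nil]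
    by_cases hcase : i + (n : Int) ≤ k
    · have e1 : (min ((n + 1 : Nat) : Int) (k - i + 1)).toNat = n + 1 := by
        push_cast; omega
      have e2 : (min ((n : Nat) : Int) (k - i + 1)).toNat = n := by omega
      have hn : n < row.length := by omega
      rw [if_pos hcase, e1, e2, PySem.List.pyGetD_natCast,
          List.sum_take_succ row n hn]
      have hg : row.getD n 0 = row[n] := by
        simp [List.getD_eq_getElem?_getD, List.getElem?_eq_getElem hn]
      rw [hg]
      ring
    · have e3 : (min ((n + 1 : Nat) : Int) (k - i + 1)).toNat
          = (min ((n : Nat) : Int) (k - i + 1)).toNat := by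
        congr 1; push_cast; omega
      rw [if_neg hcase, e3]

-- sum over List.range of indexed prefix sums = refSum (structural recursion)
theorem range_sum_eq_refSum (k cols : Int) (bs : List (List Int)) (i0 : Int) :
    ((List.range bs.length).map
      (fun i => ((bs.getD i []).take (min cols (k - (i0 + (i : Int)) + 1)).toNat).sum)).sum
    = refSum k cols bs i0 := by
  induction bs generalizing i0 with
  | nil => simp [refSum]
  | cons row rest ih =>
    rw [List.length_cons, List.range_succ_eq_map, List.map_cons, List.map_map, List.sum_cons]
    have : ((List.range rest.length).map
        ((fun i => (((row :: rest).getD i []).take (min cols (k - (i0 + (i : Int)) + 1)).toNat).sum)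
          ∘ Nat.succ)).sum
        = refSum k cols rest (i0 + 1) := by
      rw [← ih (i0 + 1)]
      apply congrArg
      apply List.map_congr_left
      intro a _
      simp only [Function.comp_apply, List.getD_cons_succ]
      congr 2
      push_cast; ring_nf
    rw [this, refSum]
    simp

theorem solution_eq_refSum (board : List (List Int)) (k : Int)
    (hpre : Pre_solution board k) :
    solution board k
      = refSum k (((PySem.List.pyGet? board 0).getD []).length : Int) board 0 := by
  obtain ⟨hne, hlen⟩ := hpre
  have hhead : (PySem.List.pyGet? board 0).getD [] = board.headD [] := by
    cases board with
    | nil => exact absurd rfl hne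
    | cons r rest => simp [PySem.List.pyGet?, PySem.List.pyIdx?]
  unfold solution
  simp only [hhead]
  refine Eq.trans (PySem.List.foldl_congr_mem _ _
    (fun total i => total + (((PySem.List.pyGetD board i []).take
        (min ((board.headD []).length : Int) (k - i + 1)).toNat).sum)) _ ?_) ?_
  · intro acc x hx
    beta_reduce
    rw [PySem.List.mem_pyRange_one] at hx
    obtain ⟨hx0, hx1⟩ := hx
    have hxn : x = ((x.toNat : Nat) : Int) := by omega
    have hxr : x.toNat ∈ List.range board.length := by
      rw [List.mem_range]; omega
    have hb := hlen x.toNat hxr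
    rw [hxn, PySem.List.pyGetD_natCast]
    refine inner_eq _ _ _ _ _ ?_
    rw [Int.toNat_le]
    omega
  · rw [PySem.List.foldl_add]
    rw [PySem.List.pyRange_zero_natCast, List.map_map, zero_add,
        ← range_sum_eq_refSum k ((board.headD []).length : Int) board 0]
    apply congrArg
    apply List.map_congr_left
    intro a _
    simp only [Function.comp_apply, PySem.List.pyGetD_natCast, zero_add]

-- ---- B-side: solution_alt = refSum ----

-- reference prefix sums of a row, starting from accumulator s
def partialSums (s : Int) : List Int → List Int
  | [] => []
  | x :: xs => (s + x) :: partialSums (s + x) xs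

theorem pyGetD_neg_one (l : List Int) (s : Int) (h : l.getLast? = some s) :
    PySem.List.pyGetD l (-1) 0 = s := by
  simp [PySem.List.pyGetD, PySem.List.pyGet?_neg_one, h]

theorem buildPref_loop (row : List Int) (acc : List Int) (s : Int)
    (h : acc.getLast? = some s) :
    row.foldl (fun pref x => pref ++ [PySem.List.pyGetD pref (-1) 0 + x]) acc
      = acc ++ partialSums s row := by
  induction row generalizing acc s with
  | nil => simp [partialSums]
  | cons x xs ih =>
    simp only [List.foldl_cons, partialSums]
    rw [pyGetD_neg_one acc s h,
        ih (acc ++ [s + x]) (s + x) (by simp), List.append_assoc]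
    rfl

theorem buildPref_eq (row : List Int) : buildPref row = 0 :: partialSums 0 row := by
  unfold buildPref
  rw [buildPref_loop row [0] 0 (by simp)]
  rfl

theorem getD_partialSums (row : List Int) (s : Int) (n : Nat) (h : n ≤ row.length) :
    (s :: partialSums s row).getD n 0 = s + (row.take n).sum := by
  induction row generalizing s n with
  | nil =>
    have : n = 0 := by simpa using h
    subst this
    simp
  | cons x xs ih =>
    cases n with
    | zero => simp
    | succ m =>
      simp only [partialSums, List.getD_cons_succ, List.take_succ_cons, List.sum_cons]
      rw [ih (s + x) m (by simpa using h)]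
      ring

theorem alt_loop_eq_refSum (k cols : Int) (bs : List (List Int)) (i0 t : Int)
    (h : ∀ p ∈ PySem.List.enumerate bs i0, (min cols (k - p.1 + 1)).toNat ≤ p.2.length) :
    (PySem.List.enumerate (bs.map buildPref) i0).foldl
      (fun total p => total + PySem.List.pyGetD p.2 (max 0 (min cols (k - p.1 + 1))) 0) t
    = t + refSum k cols bs i0 := by
  induction bs generalizing i0 t with
  | nil => simp [refSum, PySem.List.enumerate_nil]
  | cons row rest ih =>
    rw [List.map_cons, PySem.List.enumerate_cons, List.foldl_cons]
    have hrow : (min cols (k - i0 + 1)).toNat ≤ row.length := by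
      refine h (i0, row) ?_
      rw [PySem.List.enumerate_cons]; exact List.mem_cons_self
    have hidx : max 0 (min cols (k - i0 + 1))
        = (((min cols (k - i0 + 1)).toNat : Nat) : Int) := by
      rw [Int.ofNat_toNat]; omega
    have hstep : PySem.List.pyGetD (buildPref row) (max 0 (min cols (k - i0 + 1))) 0
        = (row.take (min cols (k - i0 + 1)).toNat).sum := by
      rw [hidx, PySem.List.pyGetD_natCast, buildPref_eq,
          getD_partialSums row 0 _ hrow, zero_add]
    rw [hstep, ih (i0 + 1) _ (by
      intro p hp
      exact h p (by rw [PySem.List.enumerate_cons]; exact List.mem_cons_of_mem _ hp))]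
    rw [refSum]
    ring

theorem solution_alt_eq_refSum (board : List (List Int)) (k : Int)
    (hpre : Pre_solution board k) :
    solution_alt board k
      = refSum k (((PySem.List.pyGet? board 0).getD []).length : Int) board 0 := by
  obtain ⟨hne, hlen⟩ := hpre
  have hhead : (PySem.List.pyGet? board 0).getD [] = board.headD [] := by
    cases board with
    | nil => exact absurd rfl hne
    | cons r rest => simp [PySem.List.pyGet?, PySem.List.pyIdx?]
  unfold solution_alt
  simp only [hhead]
  rw [alt_loop_eq_refSum _ _ board 0 0 ?_, zero_add]
  intro p hp
  rw [PySem.List.mem_enumerate_iff] at hp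
  obtain ⟨j, hj, rfl⟩ := hp
  have hb := hlen j (List.mem_range.mpr hj)
  rw [Int.toNat_le]
  simp only [zero_add]
  have : (board.getD j []).length = board[j].length := by
    simp [List.getD_eq_getElem?_getD, List.getElem?_eq_getElem hj]
  omega

-- ===== VERDICT (by name: the statement is the Claim_ definition above) =====
theorem solution_spec : Claim_equal_solution := by
  intro board k _hdom hpre
  unfold Spec_solution
  rw [solution_eq_refSum board k hpre, solution_alt_eq_refSum board k hpre]
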